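-- pv_equiv track=rewrite | github.com/kingpunk/Scripts | classifiers/mlp/jupyter Notebook/all_other_functions.py | correctPredictedValue
-- ===== SOURCE A (Python) =====
-- def correctPredictedValue(data,predicted):
--     normal = 0
--     stagged = 0
--
--     if len(data) == len(predicted):
--         i = 0
--         while i < len(data):
--             if data[i] == predicted[i] == 1:
--                 stagged = stagged + 1
--             if data[i] == predicted[i] == 0:
--                 normal = normal + 1
--
--             i=i+1
--
--     return normal,stagged
-- ===== SOURCE B (Python) =====
-- def correctPredictedValue(data, predicted):
--     if len(data) != len(predicted):
--         return 0, 0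
--     pairs = list(zip(data, predicted))
--     return pairs.count((0, 0)), pairs.count((1, 1))
-- ===== Notes on version B (the rewrite author's own statement) =====
-- stated objective: idiomatic
-- what changed: Replaces A's index-driven while loop that maintains two branch-updated counters in one pass by a staged-pass formulation: zip the lists once, then obtain each result as an independent list.count scan for the (0,0) and (1,1) pairs, with no accumulator or branching of our own.
import Mathlib
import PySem

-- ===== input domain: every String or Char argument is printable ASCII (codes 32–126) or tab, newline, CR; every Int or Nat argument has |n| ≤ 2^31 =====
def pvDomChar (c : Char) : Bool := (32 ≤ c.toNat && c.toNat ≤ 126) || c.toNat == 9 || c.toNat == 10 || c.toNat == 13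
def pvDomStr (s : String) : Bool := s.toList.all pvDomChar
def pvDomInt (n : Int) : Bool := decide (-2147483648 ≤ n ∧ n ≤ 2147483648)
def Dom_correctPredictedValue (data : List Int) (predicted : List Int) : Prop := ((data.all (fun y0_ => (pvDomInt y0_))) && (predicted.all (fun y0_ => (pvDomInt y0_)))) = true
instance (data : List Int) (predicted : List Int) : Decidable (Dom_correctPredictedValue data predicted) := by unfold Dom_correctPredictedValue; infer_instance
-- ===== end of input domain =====

-- B replaces A's index-based while loop with its two branch-updated counters by the
-- idiomatic staged passes: zip the lists once, then take each result as an independent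
-- list.count scan for the (0,0) and (1,1) pairs (objective: idiomatic).

-- ===== PORT A =====
-- the while loop of A: i runs over indices; both lists have equal length when it is
-- entered, so the getD default 0 of the in-range accesses is never used
def pvLoopA (data predicted : List Int) (i : Nat) (normal stagged : Int) : Int × Int :=
  if _h : i < data.length then
    let d := (PySem.List.pyGet? data (i : Int)).getD 0
    let p := (PySem.List.pyGet? predicted (i : Int)).getD 0
    pvLoopA data predicted (i + 1)
      (if d = p ∧ p = 0 then normal + 1 else normal)
      (if d = p ∧ p = 1 then stagged + 1 else stagged)
  else (normal, stagged)
termination_by data.length - i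

def correctPredictedValue (data : List Int) (predicted : List Int) : Int × Int :=
  if data.length = predicted.length then pvLoopA data predicted 0 0 0
  else (0, 0)

-- ===== PORT B =====
def correctPredictedValue_alt (data : List Int) (predicted : List Int) : Int × Int :=
  if data.length ≠ predicted.length then (0, 0)
  else
    let pairs := data.zip predicted
    ((PySem.List.count pairs (0, 0) : Int), (PySem.List.count pairs (1, 1) : Int))

-- ===== PRECONDITION & SPEC =====
def Spec_correctPredictedValue (data : List Int) (predicted : List Int) (out : Int × Int) : Prop := out = correctPredictedValue_alt data predicted
instance (data : List Int) (predicted : List Int) (out : Int × Int) : Decidable (Spec_correctPredictedValue data predicted out) := by unfold Spec_correctPredictedValue; infer_instance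

-- ===== CLAIM (what is proved, stated in full; the proofs are below) =====
def Claim_equal_correctPredictedValue : Prop := ∀ (data : List Int) (predicted : List Int), Dom_correctPredictedValue data predicted → Spec_correctPredictedValue data predicted (correctPredictedValue data predicted)

-- ===== LEMMAS AND PROOFS =====
lemma pvLoopA_eq (data predicted : List Int) (hlen : data.length = predicted.length) :
    ∀ (k i : Nat) (n s : Int), data.length - i = k →
      pvLoopA data predicted i n s =
        (n + (((data.drop i).zip (predicted.drop i)).count (0, 0) : Int),
         s + (((data.drop i).zip (predicted.drop i)).count (1, 1) : Int)) := by
  intro k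
  induction k with
  | zero =>
      intro i n s hk
      have hge : data.length ≤ i := by omega
      have hge' : predicted.length ≤ i := by omega
      rw [pvLoopA]
      simp [Nat.not_lt.mpr hge, List.drop_eq_nil_of_le hge, List.drop_eq_nil_of_le hge']
  | succ k ih =>
      intro i n s hk
      have hi : i < data.length := by omega
      have hi' : i < predicted.length := by omega
      rw [pvLoopA]
      simp only [hi, dif_pos]
      rw [ih (i + 1) _ _ (by omega)]
      rw [PySem.List.pyGet?_natCast, PySem.List.pyGet?_natCast,
          List.getElem?_eq_getElem hi, List.getElem?_eq_getElem hi']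
      have hd : data.drop i = data[i] :: data.drop (i + 1) :=
        List.drop_eq_getElem_cons hi
      have hp : predicted.drop i = predicted[i] :: predicted.drop (i + 1) :=
        List.drop_eq_getElem_cons hi'
      rw [hd, hp]
      simp only [List.zip_cons_cons, List.count_cons, Option.getD_some]
      rw [Prod.mk.injEq]
      constructor <;> split_ifs <;> simp_all [Prod.ext_iff] <;> omega

-- ===== VERDICT (by name: the statement is the Claim_ definition above) =====
theorem correctPredictedValue_spec : Claim_equal_correctPredictedValue := by
  intro data predicted _
  unfold Spec_correctPredictedValue correctPredictedValue correctPredictedValue_alt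
  by_cases h : data.length = predicted.length
  · simp only [h, ne_eq, not_true_eq_false, if_false]
    rw [pvLoopA_eq data predicted h (data.length) 0 0 0 (by omega)]
    simp [PySem.List.count]
  · simp [h]
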